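-- pv_equiv track=rewrite | github.com/superjarle/Advent-of-Code | 2022/Python/day1.py | calculate_max_calories
-- ===== SOURCE A (Python) =====
-- def calculate_max_calories(data):
--     max_calories = 0
--     current_calories = 0
--
--     for line in data:
--         if line.strip():
--             current_calories += int(line.strip())
--         else:
--             if current_calories > max_calories:
--                 max_calories = current_calories
--             current_calories = 0
--
--     if current_calories > max_calories:
--         max_calories = current_calories
--
--     return max_calories
-- ===== SOURCE B (Python) =====
-- def calculate_max_calories(data):
--     groups = []
--     current = []
--     for line in data:
--         s = line.strip()
--         if s:
--             current.append(s)
--         else: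
--             groups.append(current)
--             current = []
--     groups.append(current)
--     return max([0] + [sum(int(x) for x in g) for g in groups])
-- ===== Notes on version B (the rewrite author's own statement) =====
-- stated objective: simpler
-- what changed: Instead of threading a running max and a running sum through one loop with a trailing flush, B first partitions the lines into blank-separated groups, then returns the max of the group sums (with 0 included, matching the nonnegative start).
import Mathlib
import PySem

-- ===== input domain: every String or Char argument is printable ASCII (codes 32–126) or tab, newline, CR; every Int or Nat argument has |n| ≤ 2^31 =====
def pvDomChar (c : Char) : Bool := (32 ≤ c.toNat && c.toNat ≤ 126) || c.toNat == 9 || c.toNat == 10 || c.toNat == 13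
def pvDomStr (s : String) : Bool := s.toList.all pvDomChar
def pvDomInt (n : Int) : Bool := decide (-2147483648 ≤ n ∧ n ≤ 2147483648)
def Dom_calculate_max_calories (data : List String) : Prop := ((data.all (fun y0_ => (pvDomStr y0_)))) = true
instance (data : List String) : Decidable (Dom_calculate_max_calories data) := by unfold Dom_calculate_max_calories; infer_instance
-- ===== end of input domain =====

-- B replaces A's single loop threading a running max / running sum / trailing flush by:
-- partition into blank-separated groups, sum each group, take the max (with 0 included).

-- ===== PORT A =====
-- the for-loop over `data` with state (max_calories, current_calories), plus the trailing flush
def calcLoopA : List String → Int → Int → Int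
  | [], maxc, cur => if cur > maxc then cur else maxc
  | l :: ls, maxc, cur =>
    if PySem.Str.strip l ≠ "" then
      calcLoopA ls maxc (cur + (PySem.Int.ofStr? (PySem.Str.strip l)).getD 0)
    else
      calcLoopA ls (if cur > maxc then cur else maxc) 0

def calculate_max_calories (data : List String) : Int := calcLoopA data 0 0

-- ===== PORT B =====
-- build the blank-separated groups (of already-stripped lines), final group flushed at the end
def groupsB (cur : List String) : List String → List (List String)
  | [] => [cur]
  | l :: ls =>
    if PySem.Str.strip l ≠ "" then groupsB (cur ++ [PySem.Str.strip l]) ls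
    else cur :: groupsB [] ls

-- sum(int(x) for x in g)
def sumB (g : List String) : Int := g.foldl (fun a x => a + (PySem.Int.ofStr? x).getD 0) 0

-- max([0] + sums)
def calculate_max_calories_alt (data : List String) : Int :=
  ((groupsB [] data).map sumB).foldl max 0

-- ===== PRECONDITION & SPEC =====
-- Pre_ excludes exactly the inputs where A raises ValueError: a non-blank line whose
-- stripped text is not a valid Python int literal.
def Pre_calculate_max_calories (data : List String) : Prop :=
  ∀ l ∈ data, PySem.Str.strip l ≠ "" → (PySem.Int.ofStr? (PySem.Str.strip l)).isSome

instance (data : List String) : Decidable (Pre_calculate_max_calories data) := by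
  unfold Pre_calculate_max_calories; infer_instance

def pvWitness_calculate_max_calories : List String := ["100", " 200 ", "", "+300"]

def Spec_calculate_max_calories (data : List String) (out : Int) : Prop := out = calculate_max_calories_alt data
instance (data : List String) (out : Int) : Decidable (Spec_calculate_max_calories data out) := by unfold Spec_calculate_max_calories; infer_instance

-- ===== CLAIM (what is proved, stated in full; the proofs are below) =====
def Claim_equal_calculate_max_calories : Prop := ∀ (data : List String), Dom_calculate_max_calories data → Pre_calculate_max_calories data → Spec_calculate_max_calories data (calculate_max_calories data)

-- ===== LEMMAS AND PROOFS =====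

-- group sums where the first group is seeded with a partial sum c
def sumsFrom (c : Int) : List String → List Int
  | [] => [c]
  | l :: ls =>
    if PySem.Str.strip l ≠ "" then
      sumsFrom (c + (PySem.Int.ofStr? (PySem.Str.strip l)).getD 0) ls
    else c :: sumsFrom 0 ls

theorem foldl_max_max (l : List Int) : ∀ a b : Int, l.foldl max (max a b) = max a (l.foldl max b) := by
  induction l with
  | nil => intro a b; simp
  | cons x xs ih =>
    intro a b
    simp only [List.foldl_cons, max_assoc]
    exact ih a (max b x)

theorem le_foldl_max (l : List Int) : ∀ a : Int, a ≤ l.foldl max a := by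
  induction l with
  | nil => intro a; simp
  | cons x xs ih =>
    intro a
    exact le_trans (le_max_left a x) (ih (max a x))

theorem loopA_eq (ls : List String) : ∀ m c : Int, 0 ≤ m →
    calcLoopA ls m c = max m ((sumsFrom c ls).foldl max 0) := by
  induction ls with
  | nil => intro m c hm; simp only [calcLoopA, sumsFrom, List.foldl_cons, List.foldl_nil]; omega
  | cons l ls ih =>
    intro m c hm
    by_cases h : PySem.Str.strip l ≠ ""
    · simp only [calcLoopA, sumsFrom, if_pos h]
      exact ih m _ hm
    · simp only [calcLoopA, sumsFrom, if_neg h, List.foldl_cons]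
      rw [ih _ 0 (by omega)]
      have h2 : (sumsFrom 0 ls).foldl max (max 0 c) = max c ((sumsFrom 0 ls).foldl max 0) := by
        rw [max_comm 0 c, foldl_max_max]
      rw [h2]
      set F := (sumsFrom 0 ls).foldl max 0
      omega

theorem sumsFrom_groups (ls : List String) : ∀ cur : List String,
    sumsFrom (sumB cur) ls = (groupsB cur ls).map sumB := by
  induction ls with
  | nil => intro cur; simp [sumsFrom, groupsB]
  | cons l ls ih =>
    intro cur
    by_cases h : PySem.Str.strip l ≠ ""
    · simp only [sumsFrom, groupsB, if_pos h]
      have : sumB cur + (PySem.Int.ofStr? (PySem.Str.strip l)).getD 0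
           = sumB (cur ++ [PySem.Str.strip l]) := by
        simp [sumB, List.foldl_append]
      rw [this, ih]
    · simp only [sumsFrom, groupsB, if_neg h, List.map_cons]
      have h0 : (0 : Int) = sumB [] := by simp [sumB]
      rw [h0, ih]

-- ===== VERDICT (by name: the statement is the Claim_ definition above) =====
theorem calculate_max_calories_spec : Claim_equal_calculate_max_calories := by
  intro data _ _
  show calculate_max_calories data = calculate_max_calories_alt data
  have h0 : (0 : Int) = sumB [] := by simp [sumB]
  rw [calculate_max_calories, calculate_max_calories_alt, loopA_eq data 0 0 le_rfl,
      h0, sumsFrom_groups]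
  exact max_eq_right (le_trans (by rw [← h0]) (le_foldl_max _ 0))
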